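-- pv_equiv track=rewrite | github.com/huggin/gfg | array/total_cuts.py | totalCuts
-- ===== SOURCE A (Python) =====
-- from typing import List
--
-- def totalCuts(N: int, K: int, A: List[int]) -> int:
--     # code here
--     largest = [0] * N
--     smallest = [0] * N
--
--     largest[0] = A[0]
--     for i in range(1, N):
--         largest[i] = max(largest[i - 1], A[i])
--
--     smallest[N - 1] = A[N - 1]
--     for i in range(N - 2, -1, -1):
--         smallest[i] = min(smallest[i + 1], A[i])
--
--     ans = 0
--     for i in range(0, N - 1):
--         if largest[i] + smallest[i + 1] >= K:
--             ans += 1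
--
--     return ans
-- ===== SOURCE B (Python) =====
-- def totalCuts(N, K, A):
--     P = A[:N]
--     pref = []
--     m = P[0]
--     for x in P:
--         m = max(m, x)
--         pref.append(m)
--     suf = []
--     m = P[-1]
--     for x in reversed(P):
--         m = min(m, x)
--         suf.append(m)
--     suf.reverse()
--     # g(i) = pref[i] + suf[i+1] is non-decreasing, so the valid split
--     # points form a suffix: binary-search its first index.
--     lo, hi = 0, N - 1
--     while lo < hi:
--         mid = (lo + hi) // 2
--         if pref[mid] + suf[mid + 1] >= K:
--             hi = mid
--         else:
--             lo = mid + 1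
--     return (N - 1) - lo
-- ===== Notes on version B (the rewrite author's own statement) =====
-- stated objective: alternative
-- what changed: B builds the prefix-max/suffix-min scans as appended lists instead of index-assigned preallocated arrays, and replaces A's linear counting loop by a binary search for the first valid split point of the monotone predicate g(i)=pref[i]+suf[i+1]>=K, returning (N-1)-lo.
import Mathlib
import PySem

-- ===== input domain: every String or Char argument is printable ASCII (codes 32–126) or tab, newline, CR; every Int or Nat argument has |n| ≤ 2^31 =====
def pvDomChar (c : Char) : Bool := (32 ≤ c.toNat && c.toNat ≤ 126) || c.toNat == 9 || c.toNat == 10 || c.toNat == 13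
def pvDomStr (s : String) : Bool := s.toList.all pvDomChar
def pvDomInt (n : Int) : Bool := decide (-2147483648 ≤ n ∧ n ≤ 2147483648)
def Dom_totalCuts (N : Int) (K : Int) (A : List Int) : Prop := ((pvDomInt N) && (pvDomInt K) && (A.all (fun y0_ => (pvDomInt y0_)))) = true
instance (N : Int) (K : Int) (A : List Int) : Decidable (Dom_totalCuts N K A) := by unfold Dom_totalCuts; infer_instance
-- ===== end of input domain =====

-- B replaces A's preallocated index-assigned arrays by appended scan lists and A's
-- linear counting loop by a binary search over the monotone split predicate (alternative
-- decomposition, same asymptotic cost).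

-- ===== PORT A =====
def totalCuts (N : Int) (K : Int) (A : List Int) : Int :=
  let largest0 := PySem.List.pyRepeat [(0 : Int)] N
  let smallest0 := PySem.List.pyRepeat [(0 : Int)] N
  let largest1 := PySem.List.pySetD largest0 0 (PySem.List.pyGetD A 0 0)
  let largest := (PySem.List.pyRange 1 N 1).foldl
    (fun l i => PySem.List.pySetD l i (max (PySem.List.pyGetD l (i - 1) 0) (PySem.List.pyGetD A i 0))) largest1
  let smallest1 := PySem.List.pySetD smallest0 (N - 1) (PySem.List.pyGetD A (N - 1) 0)
  let smallest := (PySem.List.pyRange (N - 2) (-1) (-1)).foldl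
    (fun l i => PySem.List.pySetD l i (min (PySem.List.pyGetD l (i + 1) 0) (PySem.List.pyGetD A i 0))) smallest1
  (PySem.List.pyRange 0 (N - 1) 1).foldl
    (fun ans i => if PySem.List.pyGetD largest i 0 + PySem.List.pyGetD smallest (i + 1) 0 ≥ K then ans + 1 else ans) 0

-- ===== PORT B =====
-- B's while-loop lower-bound binary search, transliterated.
def bsearchB (pref suf : List Int) (K lo hi : Int) : Int :=
  if h : lo < hi then
    let mid := PySem.Int.floordiv (lo + hi) 2
    if PySem.List.pyGetD pref mid 0 + PySem.List.pyGetD suf (mid + 1) 0 ≥ K then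
      bsearchB pref suf K lo mid
    else
      bsearchB pref suf K (mid + 1) hi
  else lo
termination_by (hi - lo).toNat
decreasing_by
  all_goals
    have h1 : lo ≤ PySem.Int.floordiv (lo + hi) 2 := by
      rw [PySem.Int.le_floordiv_iff_mul_le (by omega)]; omega
    have h2 : PySem.Int.floordiv (lo + hi) 2 < hi := by
      rw [PySem.Int.floordiv_lt_iff_lt_mul (by omega)]; omega
    omega

def totalCuts_alt (N : Int) (K : Int) (A : List Int) : Int :=
  let P := PySem.List.slice A none (some N)
  let pr := P.foldl (fun st x => let m := max st.1 x; (m, st.2 ++ [m]))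
    (PySem.List.pyGetD P 0 0, ([] : List Int))
  let pref := pr.2
  let sr := P.reverse.foldl (fun st x => let m := min st.1 x; (m, st.2 ++ [m]))
    (PySem.List.pyGetD P (-1) 0, ([] : List Int))
  let suf := sr.2.reverse
  (N - 1) - bsearchB pref suf K 0 (N - 1)

-- ===== PRECONDITION & SPEC =====
-- A raises IndexError exactly when N < 1 (assignment largest[0] on an empty [0]*N, or A[0])
-- or N > len(A) (A[i] out of range); Pre_ excludes exactly those inputs.
def Pre_totalCuts (N : Int) (K : Int) (A : List Int) : Prop := 1 ≤ N ∧ N ≤ (A.length : Int)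
instance (N : Int) (K : Int) (A : List Int) : Decidable (Pre_totalCuts N K A) := by unfold Pre_totalCuts; infer_instance
def pvWitness_totalCuts : Int × Int × List Int := (3, 4, [1, 5, 2])

def Spec_totalCuts (N : Int) (K : Int) (A : List Int) (out : Int) : Prop := out = totalCuts_alt N K A
instance (N : Int) (K : Int) (A : List Int) (out : Int) : Decidable (Spec_totalCuts N K A out) := by unfold Spec_totalCuts; infer_instance

-- ===== CLAIM (what is proved, stated in full; the proofs are below) =====
def Claim_equal_totalCuts : Prop := ∀ (N : Int) (K : Int) (A : List Int), Dom_totalCuts N K A → Pre_totalCuts N K A → Spec_totalCuts N K A (totalCuts N K A)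

-- ===== LEMMAS AND PROOFS =====

-- prefix-max scan value: pfx' m L k = max(m, L[0], …, L[k])
def pfx' (m : Int) (L : List Int) : Nat → Int
  | 0 => max m (L.getD 0 0)
  | k + 1 => max (pfx' m L k) (L.getD (k + 1) 0)

-- prefix-min scan value
def mfx' (m : Int) (L : List Int) : Nat → Int
  | 0 => min m (L.getD 0 0)
  | k + 1 => min (mfx' m L k) (L.getD (k + 1) 0)

-- the list produced by B's appending max-scan loop
def scanMax : Int → List Int → List Int
  | _, [] => []
  | m, x :: t => max m x :: scanMax (max m x) t

def scanMin : Int → List Int → List Int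
  | _, [] => []
  | m, x :: t => min m x :: scanMin (min m x) t

lemma foldl_scanMax (L : List Int) (m : Int) (acc : List Int) :
    L.foldl (fun st x => let m := max st.1 x; (m, st.2 ++ [m])) (m, acc)
      = (L.foldl max m, acc ++ scanMax m L) := by
  induction L generalizing m acc with
  | nil => simp [scanMax]
  | cons x t ih => simp [scanMax, ih, List.append_assoc]

lemma foldl_scanMin (L : List Int) (m : Int) (acc : List Int) :
    L.foldl (fun st x => let m := min st.1 x; (m, st.2 ++ [m])) (m, acc)
      = (L.foldl min m, acc ++ scanMin m L) := by
  induction L generalizing m acc with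
  | nil => simp [scanMin]
  | cons x t ih => simp [scanMin, ih, List.append_assoc]

lemma length_scanMin (m : Int) (L : List Int) : (scanMin m L).length = L.length := by
  induction L generalizing m with
  | nil => rfl
  | cons x t ih => simp [scanMin, ih]

lemma pfx'_cons (m x : Int) (t : List Int) (k : Nat) :
    pfx' m (x :: t) (k + 1) = pfx' (max m x) t k := by
  induction k with
  | zero => simp [pfx']
  | succ k ih =>
    have h : pfx' m (x :: t) (k + 1 + 1) = max (pfx' m (x :: t) (k + 1)) (t.getD (k + 1) 0) := rfl
    rw [h, ih]; rfl

lemma mfx'_cons (m x : Int) (t : List Int) (k : Nat) :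
    mfx' m (x :: t) (k + 1) = mfx' (min m x) t k := by
  induction k with
  | zero => simp [mfx']
  | succ k ih =>
    have h : mfx' m (x :: t) (k + 1 + 1) = min (mfx' m (x :: t) (k + 1)) (t.getD (k + 1) 0) := rfl
    rw [h, ih]; rfl

lemma getD_scanMax (L : List Int) (m : Int) (k : Nat) (hk : k < L.length) :
    (scanMax m L).getD k 0 = pfx' m L k := by
  induction L generalizing m k with
  | nil => simp at hk
  | cons x t ih =>
    cases k with
    | zero => simp [scanMax, pfx']
    | succ k => simp only [scanMax, List.getD_cons_succ, pfx'_cons]; exact ih _ _ (by simpa using hk)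

lemma getD_scanMin (L : List Int) (m : Int) (k : Nat) (hk : k < L.length) :
    (scanMin m L).getD k 0 = mfx' m L k := by
  induction L generalizing m k with
  | nil => simp at hk
  | cons x t ih =>
    cases k with
    | zero => simp [scanMin, mfx']
    | succ k => simp only [scanMin, List.getD_cons_succ, mfx'_cons]; exact ih _ _ (by simpa using hk)

lemma getD_reverse (M : List Int) (j : Nat) (hj : j < M.length) :
    M.reverse.getD j 0 = M.getD (M.length - 1 - j) 0 := by
  rw [List.getD_eq_getElem?_getD, List.getD_eq_getElem?_getD, List.getElem?_reverse hj]

lemma pfx'_mono (m : Int) (L : List Int) (a b : Nat) (h : a ≤ b) :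
    pfx' m L a ≤ pfx' m L b := by
  induction b with
  | zero => simp_all
  | succ b ih =>
    rcases Nat.lt_or_ge a (b + 1) with hb | hb
    · exact le_trans (ih (by omega)) (by simp [pfx'])
    · have : a = b + 1 := by omega
      simp [this]

-- smallest[k] as a value: Sv M k = min(M[k], …, M[last])
def Sv (M : List Int) (k : Nat) : Int :=
  mfx' (M.reverse.getD 0 0) M.reverse (M.length - 1 - k)

lemma Sv_last (M : List Int) (h : 0 < M.length) :
    Sv M (M.length - 1) = M.getD (M.length - 1) 0 := by
  have h0 : M.length - 1 - (M.length - 1) = 0 := by omega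
  have hr : M.reverse.getD 0 0 = M.getD (M.length - 1) 0 := by
    rw [getD_reverse M 0 (by omega)]; congr 1
  rw [Sv, h0]
  show min (M.reverse.getD 0 0) (M.reverse.getD 0 0) = _
  rw [min_self, hr]

lemma Sv_last' (M : List Int) (n : Nat) (hn : M.length = n) (h : 0 < n) :
    Sv M (n - 1) = M.getD (n - 1) 0 := by
  subst hn
  exact Sv_last M h

lemma Sv_step (M : List Int) (k : Nat) (hk : k + 1 < M.length) :
    Sv M k = min (Sv M (k + 1)) (M.getD k 0) := by
  have h1 : M.length - 1 - k = (M.length - 1 - (k + 1)) + 1 := by omega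
  have h2 : M.length - 1 - (k + 1) + 1 < M.length := by omega
  have hr : M.reverse.getD (M.length - 1 - (k + 1) + 1) 0 = M.getD k 0 := by
    rw [getD_reverse M _ h2]
    congr 1
    omega
  rw [Sv, h1]
  show min (mfx' (M.reverse.getD 0 0) M.reverse (M.length - 1 - (k + 1)))
      (M.reverse.getD (M.length - 1 - (k + 1) + 1) 0) = _
  rw [hr]; rfl

lemma Sv_mono (M : List Int) (a b : Nat) (h : a ≤ b) (hb : b < M.length) :
    Sv M a ≤ Sv M b := by
  induction b with
  | zero => simp_all
  | succ b ih =>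
    rcases Nat.lt_or_ge a (b + 1) with hab | hab
    · exact le_trans (ih (by omega) (by omega)) (by rw [Sv_step M b hb]; exact min_le_left _ _)
    · have : a = b + 1 := by omega
      simp [this]

lemma getD_take (A : List Int) (n i : Nat) (hi : i < n) :
    (A.take n).getD i 0 = A.getD i 0 := by
  rw [List.getD_eq_getElem?_getD, List.getD_eq_getElem?_getD, List.getElem?_take]
  simp [hi]

-- the binary search equals hi - (number of true positions in [lo,hi)) for a monotone test
lemma bsearch_count (pref suf : List Int) (K : Int) :
    ∀ d : Nat, ∀ lo hi : Int, (hi - lo).toNat = d → lo ≤ hi →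
    (∀ i j : Int, lo ≤ i → i ≤ j → j < hi →
        PySem.List.pyGetD pref i 0 + PySem.List.pyGetD suf (i + 1) 0 ≥ K →
        PySem.List.pyGetD pref j 0 + PySem.List.pyGetD suf (j + 1) 0 ≥ K) →
    bsearchB pref suf K lo hi
      = hi - ((PySem.List.pyRange lo hi 1).countP
          (fun i => decide (PySem.List.pyGetD pref i 0 + PySem.List.pyGetD suf (i + 1) 0 ≥ K)) : Int) := by
  intro d
  induction d using Nat.strong_induction_on with
  | _ d ih =>
    intro lo hi hd hle hmono
    by_cases hlt : lo < hi
    · have h1 : lo ≤ PySem.Int.floordiv (lo + hi) 2 := by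
        rw [PySem.Int.le_floordiv_iff_mul_le (by omega)]; omega
      have h2 : PySem.Int.floordiv (lo + hi) 2 < hi := by
        rw [PySem.Int.floordiv_lt_iff_lt_mul (by omega)]; omega
      set mid := PySem.Int.floordiv (lo + hi) 2 with hmid
      rw [bsearchB]
      simp only [dif_pos hlt]
      rw [PySem.List.pyRange_one_append lo mid hi h1 (le_of_lt h2), List.countP_append]
      by_cases htest : PySem.List.pyGetD pref mid 0 + PySem.List.pyGetD suf (mid + 1) 0 ≥ K
      · rw [if_pos htest, ← hmid]
        rw [ih (mid - lo).toNat (by omega) lo mid rfl h1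
          (fun i j hi1 hij hj ht => hmono i j hi1 hij (by omega) ht)]
        have hall : (PySem.List.pyRange mid hi 1).countP
            (fun i => decide (PySem.List.pyGetD pref i 0 + PySem.List.pyGetD suf (i + 1) 0 ≥ K))
            = (PySem.List.pyRange mid hi 1).length := by
          apply List.countP_eq_length.2
          intro x hx
          rw [PySem.List.mem_pyRange_one] at hx
          exact decide_eq_true (hmono mid x h1 hx.1 hx.2 htest)
        rw [hall, PySem.List.length_pyRange_one]
        omega
      · rw [if_neg htest, ← hmid]
        rw [ih (hi - (mid + 1)).toNat (by omega) (mid + 1) hi rfl (by omega)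
          (fun i j hi1 hij hj ht => hmono i j (by omega) hij hj ht)]
        have hnone : (PySem.List.pyRange lo mid 1).countP
            (fun i => decide (PySem.List.pyGetD pref i 0 + PySem.List.pyGetD suf (i + 1) 0 ≥ K)) = 0 := by
          apply List.countP_eq_zero.2
          intro x hx
          rw [PySem.List.mem_pyRange_one] at hx
          simp only [decide_eq_true_eq]
          intro ht
          exact htest (hmono x mid hx.1 (le_of_lt hx.2) h2 ht)
        rw [PySem.List.pyRange_one_append mid (mid + 1) hi (by omega) (by omega), List.countP_append,
          PySem.List.pyRange_one_singleton]
        simp only [List.countP_cons, List.countP_nil, decide_eq_true_eq]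
        rw [if_neg htest, hnone]
        omega
    · have hèq : lo = hi := by omega
      rw [bsearchB]
      simp [hlt, hèq, PySem.List.pyRange_one_eq_nil (le_of_eq hèq.symm)]


lemma getD_set_nat (xs : List Int) (j : Nat) (v : Int) (i : Nat) (hj : j < xs.length) :
    (xs.set j v).getD i 0 = if i = j then v else xs.getD i 0 := by
  rw [List.getD_eq_getElem?_getD, List.getD_eq_getElem?_getD, List.getElem?_set]
  by_cases h : i = j
  · subst h; simp [hj]
  · simp [h, Ne.symm h]

lemma getD_replicate_zero (n i : Nat) : (List.replicate n (0 : Int)).getD i 0 = 0 := by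
  rw [List.getD_eq_getElem?_getD, List.getElem?_replicate]
  split_ifs <;> rfl

lemma getD_eq_getElem' (L : List Int) (k : Nat) (hk : k < L.length) : L.getD k 0 = L[k] := by
  rw [List.getD_eq_getElem?_getD, List.getElem?_eq_getElem hk]
  rfl

-- invariant of A's forward prefix-max loop
lemma largest_inv (A : List Int) (N : Int) (h1 : 1 ≤ N) (h2 : N ≤ (A.length : Int)) :
    ∀ m : Nat, m ≤ N.toNat - 1 →
    (((List.range m).map (fun k : Nat => (1 : Int) + (k : Int))).foldl
        (fun l i => PySem.List.pySetD l i (max (PySem.List.pyGetD l (i - 1) 0) (PySem.List.pyGetD A i 0)))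
        (PySem.List.pySetD (PySem.List.pyRepeat [(0 : Int)] N) 0 (PySem.List.pyGetD A 0 0))).length = N.toNat
    ∧ ∀ i : Nat, i < N.toNat →
      PySem.List.pyGetD (((List.range m).map (fun k : Nat => (1 : Int) + (k : Int))).foldl
        (fun l i => PySem.List.pySetD l i (max (PySem.List.pyGetD l (i - 1) 0) (PySem.List.pyGetD A i 0)))
        (PySem.List.pySetD (PySem.List.pyRepeat [(0 : Int)] N) 0 (PySem.List.pyGetD A 0 0))) (i : Int) 0
      = if i ≤ m then pfx' ((A.take N.toNat).getD 0 0) (A.take N.toNat) i else 0 := by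
  have hinit : PySem.List.pySetD (PySem.List.pyRepeat [(0 : Int)] N) 0 (PySem.List.pyGetD A 0 0)
      = (List.replicate N.toNat (0 : Int)).set 0 (A.getD 0 0) := by
    rw [PySem.List.pyRepeat_singleton, PySem.List.pySetD_of_nonneg _ _ (show (0:Int) ≤ 0 by omega),
      PySem.List.pyGetD_zero]
    norm_num
  intro m
  induction m with
  | zero =>
    intro _
    constructor
    · show (PySem.List.pySetD (PySem.List.pyRepeat [(0 : Int)] N) 0 (PySem.List.pyGetD A 0 0)).length = N.toNat
      rw [hinit]
      simp
    · intro i hi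
      show PySem.List.pyGetD (PySem.List.pySetD (PySem.List.pyRepeat [(0 : Int)] N) 0 (PySem.List.pyGetD A 0 0)) (i : Int) 0 = _
      rw [hinit, PySem.List.pyGetD_natCast, getD_set_nat _ 0 _ i (by simp; omega)]
      by_cases h0 : i = 0
      · subst h0
        rw [if_pos rfl, if_pos (le_refl 0)]
        have hp : pfx' ((A.take N.toNat).getD 0 0) (A.take N.toNat) 0 = (A.take N.toNat).getD 0 0 := by
          show max ((A.take N.toNat).getD 0 0) ((A.take N.toNat).getD 0 0) = (A.take N.toNat).getD 0 0
          exact max_self _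
        rw [hp, getD_take A N.toNat 0 (by omega)]
      · rw [if_neg h0, if_neg (by omega), getD_replicate_zero]
  | succ m ih =>
    intro hm
    obtain ⟨ihlen, ihget⟩ := ih (by omega)
    rw [List.range_succ, List.map_append, List.foldl_append]
    simp only [List.map_cons, List.map_nil, List.foldl_cons, List.foldl_nil]
    set T := ((List.range m).map (fun k : Nat => (1 : Int) + (k : Int))).foldl
        (fun l i => PySem.List.pySetD l i (max (PySem.List.pyGetD l (i - 1) 0) (PySem.List.pyGetD A i 0)))
        (PySem.List.pySetD (PySem.List.pyRepeat [(0 : Int)] N) 0 (PySem.List.pyGetD A 0 0)) with hT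
    have e1 : (1 : Int) + (m : Int) - 1 = ((m : Nat) : Int) := by push_cast; ring
    have e2 : (1 : Int) + (m : Int) = (((m + 1 : Nat)) : Int) := by push_cast; ring
    rw [e1, e2]
    have hv : PySem.List.pyGetD T ((m : Nat) : Int) 0
        = pfx' ((A.take N.toNat).getD 0 0) (A.take N.toNat) m := by
      rw [ihget m (by omega), if_pos (le_refl m)]
    have hA : PySem.List.pyGetD A (((m + 1 : Nat)) : Int) 0 = (A.take N.toNat).getD (m + 1) 0 := by
      rw [PySem.List.pyGetD_natCast, getD_take A N.toNat (m + 1) (by omega)]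
    rw [hv, hA, PySem.List.pySetD_natCast]
    have hval : max (pfx' ((A.take N.toNat).getD 0 0) (A.take N.toNat) m) ((A.take N.toNat).getD (m + 1) 0)
        = pfx' ((A.take N.toNat).getD 0 0) (A.take N.toNat) (m + 1) := rfl
    rw [hval]
    constructor
    · simp [ihlen]
    · intro i hi
      rw [PySem.List.pyGetD_natCast, getD_set_nat T (m + 1) _ i (by omega)]
      by_cases hcase : i = m + 1
      · subst hcase
        rw [if_pos rfl, if_pos (le_refl _)]
      · rw [if_neg hcase]
        have hprev := ihget i hi
        rw [PySem.List.pyGetD_natCast] at hprev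
        rw [hprev]
        by_cases hle : i ≤ m
        · rw [if_pos hle, if_pos (by omega)]
        · rw [if_neg hle, if_neg (by omega)]

-- invariant of A's backward suffix-min loop
lemma smallest_inv (A : List Int) (N : Int) (h1 : 1 ≤ N) (h2 : N ≤ (A.length : Int)) :
    ∀ m : Nat, m ≤ N.toNat - 1 →
    (((List.range m).map (fun k : Nat => (N - 2 : Int) - (k : Int))).foldl
        (fun l i => PySem.List.pySetD l i (min (PySem.List.pyGetD l (i + 1) 0) (PySem.List.pyGetD A i 0)))
        (PySem.List.pySetD (PySem.List.pyRepeat [(0 : Int)] N) (N - 1) (PySem.List.pyGetD A (N - 1) 0))).length = N.toNat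
    ∧ ∀ i : Nat, i < N.toNat →
      PySem.List.pyGetD (((List.range m).map (fun k : Nat => (N - 2 : Int) - (k : Int))).foldl
        (fun l i => PySem.List.pySetD l i (min (PySem.List.pyGetD l (i + 1) 0) (PySem.List.pyGetD A i 0)))
        (PySem.List.pySetD (PySem.List.pyRepeat [(0 : Int)] N) (N - 1) (PySem.List.pyGetD A (N - 1) 0))) (i : Int) 0
      = if N.toNat - 1 - m ≤ i then Sv (A.take N.toNat) i else 0 := by
  have hMlen : (A.take N.toNat).length = N.toNat := by
    rw [List.length_take]; omega
  have eN1 : (N - 1 : Int) = ((N.toNat - 1 : Nat) : Int) := by omega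
  have hlast : PySem.List.pyGetD A (N - 1) 0 = Sv (A.take N.toNat) (N.toNat - 1) := by
    rw [eN1, PySem.List.pyGetD_natCast, ← getD_take A N.toNat (N.toNat - 1) (by omega)]
    rw [Sv_last' (A.take N.toNat) N.toNat hMlen (by omega)]
  have hinit : PySem.List.pySetD (PySem.List.pyRepeat [(0 : Int)] N) (N - 1) (PySem.List.pyGetD A (N - 1) 0)
      = (List.replicate N.toNat (0 : Int)).set (N.toNat - 1) (Sv (A.take N.toNat) (N.toNat - 1)) := by
    rw [hlast, PySem.List.pyRepeat_singleton,
      PySem.List.pySetD_of_nonneg _ _ (show (0:Int) ≤ N - 1 by omega)]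
    congr 1
    omega
  intro m
  induction m with
  | zero =>
    intro _
    constructor
    · show (PySem.List.pySetD (PySem.List.pyRepeat [(0 : Int)] N) (N - 1) (PySem.List.pyGetD A (N - 1) 0)).length = N.toNat
      rw [hinit]
      simp
    · intro i hi
      show PySem.List.pyGetD (PySem.List.pySetD (PySem.List.pyRepeat [(0 : Int)] N) (N - 1) (PySem.List.pyGetD A (N - 1) 0)) (i : Int) 0 = _
      rw [hinit, PySem.List.pyGetD_natCast, getD_set_nat _ (N.toNat - 1) _ i (by simp; omega)]
      by_cases h0 : i = N.toNat - 1
      · subst h0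
        rw [if_pos rfl, if_pos (by omega)]
      · rw [if_neg h0, if_neg (by omega), getD_replicate_zero]
  | succ m ih =>
    intro hm
    obtain ⟨ihlen, ihget⟩ := ih (by omega)
    rw [List.range_succ, List.map_append, List.foldl_append]
    simp only [List.map_cons, List.map_nil, List.foldl_cons, List.foldl_nil]
    set T := ((List.range m).map (fun k : Nat => (N - 2 : Int) - (k : Int))).foldl
        (fun l i => PySem.List.pySetD l i (min (PySem.List.pyGetD l (i + 1) 0) (PySem.List.pyGetD A i 0)))
        (PySem.List.pySetD (PySem.List.pyRepeat [(0 : Int)] N) (N - 1) (PySem.List.pyGetD A (N - 1) 0)) with hT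
    have e1 : (N - 2 : Int) - (m : Int) + 1 = ((N.toNat - 1 - m : Nat) : Int) := by omega
    have e2 : (N - 2 : Int) - (m : Int) = ((N.toNat - 2 - m : Nat) : Int) := by omega
    rw [e1, e2]
    have hv : PySem.List.pyGetD T ((N.toNat - 1 - m : Nat) : Int) 0
        = Sv (A.take N.toNat) (N.toNat - 1 - m) := by
      rw [ihget (N.toNat - 1 - m) (by omega), if_pos (le_refl _)]
    have hA : PySem.List.pyGetD A ((N.toNat - 2 - m : Nat) : Int) 0
        = (A.take N.toNat).getD (N.toNat - 2 - m) 0 := by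
      rw [PySem.List.pyGetD_natCast, getD_take A N.toNat (N.toNat - 2 - m) (by omega)]
    rw [hv, hA, PySem.List.pySetD_natCast]
    have hval : min (Sv (A.take N.toNat) (N.toNat - 1 - m)) ((A.take N.toNat).getD (N.toNat - 2 - m) 0)
        = Sv (A.take N.toNat) (N.toNat - 2 - m) := by
      have hs := Sv_step (A.take N.toNat) (N.toNat - 2 - m) (by omega)
      rw [show N.toNat - 2 - m + 1 = N.toNat - 1 - m by omega] at hs
      rw [hs]
    rw [hval]
    constructor
    · simp [ihlen]
    · intro i hi
      rw [PySem.List.pyGetD_natCast, getD_set_nat T (N.toNat - 2 - m) _ i (by omega)]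
      by_cases hcase : i = N.toNat - 2 - m
      · subst hcase
        rw [if_pos rfl, if_pos (by omega)]
      · rw [if_neg hcase]
        have hprev := ihget i hi
        rw [PySem.List.pyGetD_natCast] at hprev
        rw [hprev]
        by_cases hle : N.toNat - 1 - m ≤ i
        · rw [if_pos hle, if_pos (by omega)]
        · rw [if_neg hle, if_neg (by omega)]

-- ===== VERDICT (by name: the statement is the Claim_ definition above) =====
theorem totalCuts_spec : Claim_equal_totalCuts := by
  intro N K A _ hpre
  obtain ⟨h1, h2⟩ := hpre
  have hMlen : (A.take N.toNat).length = N.toNat := by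
    rw [List.length_take]; omega
  have hne : (A.take N.toNat) ≠ [] := by
    intro hh
    rw [hh] at hMlen
    simp at hMlen
    omega
  unfold Spec_totalCuts
  simp only [totalCuts, totalCuts_alt]
  rw [PySem.List.pyRange_one 1 N, PySem.List.pyRange_neg_one (N - 2) (-1)]
  rw [PySem.List.slice_to A (show (0:Int) ≤ N by omega)]
  rw [foldl_scanMax, foldl_scanMin]
  simp only [List.nil_append]
  obtain ⟨hLlen, hLget⟩ := largest_inv A N h1 h2 (N - 1).toNat (by omega)
  obtain ⟨hSlen, hSget⟩ := smallest_inv A N h1 h2 (N - 2 - -1).toNat (by omega)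
  -- characterize B's scan lists
  have hprefc : ∀ k : Nat, k < N.toNat →
      PySem.List.pyGetD (scanMax (PySem.List.pyGetD (A.take N.toNat) 0 0) (A.take N.toNat)) (k : Int) 0
        = pfx' ((A.take N.toNat).getD 0 0) (A.take N.toNat) k := by
    intro k hk
    rw [PySem.List.pyGetD_natCast, PySem.List.pyGetD_zero,
      getD_scanMax (A.take N.toNat) _ k (by rw [hMlen]; omega)]
  have hm1 : PySem.List.pyGetD (A.take N.toNat) (-1) 0 = (A.take N.toNat).reverse.getD 0 0 := by
    rw [PySem.List.pyGetD_neg_one _ _ hne, List.getLast_eq_getElem,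
      getD_reverse _ 0 (by rw [hMlen]; omega),
      getD_eq_getElem' _ _ (by rw [hMlen]; omega)]
    simp
  have hsufc : ∀ k : Nat, k < N.toNat →
      PySem.List.pyGetD ((scanMin (PySem.List.pyGetD (A.take N.toNat) (-1) 0) (A.take N.toNat).reverse).reverse) (k : Int) 0
        = Sv (A.take N.toNat) k := by
    intro k hk
    have hlen1 : (scanMin (PySem.List.pyGetD (A.take N.toNat) (-1) 0) (A.take N.toNat).reverse).length = N.toNat := by
      rw [length_scanMin, List.length_reverse, hMlen]
    rw [PySem.List.pyGetD_natCast, getD_reverse _ k (by rw [hlen1]; omega),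
      getD_scanMin _ _ _ (by rw [List.length_reverse, hMlen, hlen1]; omega)]
    rw [hlen1, hm1]
    unfold Sv
    rw [hMlen]
  -- the monotone-test hypothesis of the binary search
  have hmono : ∀ i j : Int, 0 ≤ i → i ≤ j → j < N - 1 →
      PySem.List.pyGetD (scanMax (PySem.List.pyGetD (A.take N.toNat) 0 0) (A.take N.toNat)) i 0 +
        PySem.List.pyGetD ((scanMin (PySem.List.pyGetD (A.take N.toNat) (-1) 0) (A.take N.toNat).reverse).reverse) (i + 1) 0 ≥ K →
      PySem.List.pyGetD (scanMax (PySem.List.pyGetD (A.take N.toNat) 0 0) (A.take N.toNat)) j 0 +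
        PySem.List.pyGetD ((scanMin (PySem.List.pyGetD (A.take N.toNat) (-1) 0) (A.take N.toNat).reverse).reverse) (j + 1) 0 ≥ K := by
    intro i j hi hij hj
    obtain ⟨a, rfl⟩ : ∃ a : Nat, i = (a : Int) := ⟨i.toNat, (Int.toNat_of_nonneg hi).symm⟩
    obtain ⟨b, rfl⟩ : ∃ b : Nat, j = (b : Int) := ⟨j.toNat, (Int.toNat_of_nonneg (by omega)).symm⟩
    have ea : ((a : Int) + 1) = ((a + 1 : Nat) : Int) := by push_cast; ring
    have eb : ((b : Int) + 1) = ((b + 1 : Nat) : Int) := by push_cast; ring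
    rw [ea, eb, hprefc a (by omega), hprefc b (by omega),
      hsufc (a + 1) (by omega), hsufc (b + 1) (by omega)]
    intro ht
    have hmono1 := pfx'_mono ((A.take N.toNat).getD 0 0) (A.take N.toNat) a b (by omega)
    have hmono2 := Sv_mono (A.take N.toNat) (a + 1) (b + 1) (by omega) (by rw [hMlen]; omega)
    exact le_trans ht (add_le_add hmono1 hmono2)
  rw [PySem.List.foldl_ite_add_one]
  rw [bsearch_count (scanMax (PySem.List.pyGetD (A.take N.toNat) 0 0) (A.take N.toNat))
      ((scanMin (PySem.List.pyGetD (A.take N.toNat) (-1) 0) (A.take N.toNat).reverse).reverse) K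
      ((N - 1) - 0).toNat 0 (N - 1) rfl (by omega) hmono]
  have hcnt : (PySem.List.pyRange 0 (N - 1) 1).countP
      (fun x => decide (PySem.List.pyGetD (((List.range (N - 1).toNat).map (fun k : Nat => (1 : Int) + (k : Int))).foldl
        (fun l i => PySem.List.pySetD l i (max (PySem.List.pyGetD l (i - 1) 0) (PySem.List.pyGetD A i 0)))
        (PySem.List.pySetD (PySem.List.pyRepeat [(0 : Int)] N) 0 (PySem.List.pyGetD A 0 0))) x 0 +
        PySem.List.pyGetD (((List.range (N - 2 - -1).toNat).map (fun k : Nat => (N - 2 : Int) - (k : Int))).foldl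
        (fun l i => PySem.List.pySetD l i (min (PySem.List.pyGetD l (i + 1) 0) (PySem.List.pyGetD A i 0)))
        (PySem.List.pySetD (PySem.List.pyRepeat [(0 : Int)] N) (N - 1) (PySem.List.pyGetD A (N - 1) 0))) (x + 1) 0 ≥ K))
      = (PySem.List.pyRange 0 (N - 1) 1).countP
      (fun i => decide (PySem.List.pyGetD (scanMax (PySem.List.pyGetD (A.take N.toNat) 0 0) (A.take N.toNat)) i 0 +
        PySem.List.pyGetD ((scanMin (PySem.List.pyGetD (A.take N.toNat) (-1) 0) (A.take N.toNat).reverse).reverse) (i + 1) 0 ≥ K)) := by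
    apply List.countP_congr
    intro x hx
    rw [PySem.List.mem_pyRange_one] at hx
    obtain ⟨k, rfl⟩ : ∃ k : Nat, x = (k : Int) := ⟨x.toNat, (Int.toNat_of_nonneg hx.1).symm⟩
    have ek : ((k : Int) + 1) = ((k + 1 : Nat) : Int) := by push_cast; ring
    simp only [decide_eq_true_eq]
    rw [ek, hLget k (by omega), hSget (k + 1) (by omega),
      hprefc k (by omega), hsufc (k + 1) (by omega)]
    rw [if_pos (show k ≤ (N - 1).toNat by omega), if_pos (show N.toNat - 1 - (N - 2 - -1).toNat ≤ k + 1 by omega)]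
  rw [hcnt]
  omega
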